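-- pv_equiv track=rewrite | github.com/JooHan10/python_training | 프로그래머스/lv1/82612. 부족한 금액 계산하기/부족한 금액 계산하기.py | solution
-- ===== SOURCE A (Python) =====
-- def solution(price, money, count):
--     expense = 0
--
--     for n in range(1, count+1):
--         expense += price*n
--
--     if expense-money > 0:
--         return expense-money
--     else:
--         return 0
-- ===== SOURCE B (Python) =====
-- def solution(price, money, count):
--     total = price * count * (count + 1) // 2 if count > 0 else 0
--     shortfall = total - money
--     return shortfall if shortfall > 0 else 0
-- ===== Notes on version B (the rewrite author's own statement) =====
-- stated objective: faster
-- what changed: Replaced the O(count) loop summing price*n with the closed-form Gauss sum price*count*(count+1)//2.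
import Mathlib
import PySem

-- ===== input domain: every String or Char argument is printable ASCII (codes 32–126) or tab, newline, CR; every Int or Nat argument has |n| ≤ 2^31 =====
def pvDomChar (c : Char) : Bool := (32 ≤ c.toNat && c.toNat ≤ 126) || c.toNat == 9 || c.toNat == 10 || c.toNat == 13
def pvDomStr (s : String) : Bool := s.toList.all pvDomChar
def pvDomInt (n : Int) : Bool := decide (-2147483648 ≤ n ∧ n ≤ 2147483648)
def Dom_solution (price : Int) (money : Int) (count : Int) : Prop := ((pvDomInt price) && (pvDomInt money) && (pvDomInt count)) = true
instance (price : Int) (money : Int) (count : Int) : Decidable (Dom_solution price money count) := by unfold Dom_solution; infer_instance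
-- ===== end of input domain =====

-- B replaces A's O(count) summation loop by the closed-form Gauss sum price*count*(count+1)//2 (objective: faster).

-- ===== PORT A =====
def solution (price : Int) (money : Int) (count : Int) : Int :=
  let expense := (PySem.List.pyRange 1 (count + 1) 1).foldl (fun e n => e + price * n) 0
  if expense - money > 0 then expense - money else 0

-- ===== PORT B =====
def solution_alt (price : Int) (money : Int) (count : Int) : Int :=
  let total := if count > 0 then PySem.Int.floordiv (price * count * (count + 1)) 2 else 0
  let shortfall := total - money
  if shortfall > 0 then shortfall else 0

-- ===== PRECONDITION & SPEC =====
def Spec_solution (price : Int) (money : Int) (count : Int) (out : Int) : Prop := out = solution_alt price money count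
instance (price : Int) (money : Int) (count : Int) (out : Int) : Decidable (Spec_solution price money count out) := by unfold Spec_solution; infer_instance

-- ===== CLAIM (what is proved, stated in full; the proofs are below) =====
def Claim_equal_solution : Prop := ∀ (price : Int) (money : Int) (count : Int), Dom_solution price money count → Spec_solution price money count (solution price money count)

-- ===== LEMMAS AND PROOFS =====

-- Twice the loop's sum is price*n*(n+1) (Gauss), for any starting accumulator e.
theorem pv_fold_gauss (price : Int) (n : Nat) (e : Int) :
    2 * ((PySem.List.pyRange 1 ((n : Int) + 1) 1).foldl (fun a k => a + price * k) e)
      = 2 * e + price * n * (n + 1) := by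
  induction n generalizing e with
  | zero => simp
  | succ m ih =>
    have h : ((m + 1 : Nat) : Int) + 1 = ((m : Int) + 1) + 1 := by push_cast; ring
    rw [h, PySem.List.pyRange_one_succ_right (by omega : (1:Int) ≤ (m : Int) + 1)]
    rw [List.foldl_append]
    simp only [List.foldl_cons, List.foldl_nil]
    have := ih e
    push_cast
    linarith

-- The loop sum equals the closed form for positive count.
theorem pv_expense_closed (price count : Int) (hc : 0 < count) :
    (PySem.List.pyRange 1 (count + 1) 1).foldl (fun e n => e + price * n) 0
      = PySem.Int.floordiv (price * count * (count + 1)) 2 := by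
  obtain ⟨n, rfl⟩ : ∃ n : Nat, count = (n : Int) := ⟨count.toNat, (Int.toNat_of_nonneg hc.le).symm⟩
  have hg := pv_fold_gauss price n 0
  rw [PySem.Int.floordiv_eq_ediv_of_pos (by norm_num)]
  have : price * (n : Int) * ((n : Int) + 1)
      = 2 * ((PySem.List.pyRange 1 ((n : Int) + 1) 1).foldl (fun e k => e + price * k) 0) := by
    linarith
  rw [this, Int.mul_ediv_cancel_left _ (by norm_num : (2:Int) ≠ 0)]

-- ===== VERDICT (by name: the statement is the Claim_ definition above) =====
theorem solution_spec : Claim_equal_solution := by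
  intro price money count _
  unfold Spec_solution solution solution_alt
  by_cases hc : 0 < count
  · simp only [hc, if_pos, pv_expense_closed price count hc]
  · have hnil : PySem.List.pyRange 1 (count + 1) 1 = [] :=
      PySem.List.pyRange_one_eq_nil (by omega)
    simp [hnil, hc]
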